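-- pv_equiv track=rewrite | github.com/Kittyuzu1207/Leecode | LCCI/0419M兰顿蚂蚁.py | printKMoves
-- ===== SOURCE A (Python) =====
-- from typing import List
--
-- def printKMoves(K: int) -> List[str]:
--     color = '_'
--     res = ['_']
--     d = 'R'
--     now = [0, 0]
--     while K > 0:
--         K -= 1
--         if d == 'R':
--             if color == '_':
--                 res[now[0]] = res[now[0]][:now[1]] + 'X' + res[now[0]][now[1]+1:]
--                 if now[0] == len(res)-1:
--                     res.append('_'*len(res[0]))  #扩宽下边界
--                 d = 'D'
--                 now[0] += 1
--                 color = res[now[0]][now[1]]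
--             else:
--                 res[now[0]] = res[now[0]][:now[1]] + '_' + res[now[0]][now[1]+1:]
--                 if now[0] == 0:
--                     res.insert(0, '_'*len(res[0]))   #扩宽上边界
--                     now[0] += 1
--                 d = 'U'
--                 now[0] -= 1
--                 color = res[now[0]][now[1]]
--         elif d == 'L':
--             if color == '_':
--                 res[now[0]] = res[now[0]][:now[1]] + 'X' + res[now[0]][now[1]+1:]
--                 if now[0] == 0:
--                     res.insert(0, '_'*len(res[0]))
--                     now[0] += 1
--                 now[0] -= 1
--                 d = 'U'
--                 color = res[now[0]][now[1]]
--             else: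
--                 res[now[0]] = res[now[0]][:now[1]] + '_' + res[now[0]][now[1]+1:]
--                 if now[0] == len(res)-1:
--                     res.append('_'*len(res[0]))
--                 d = 'D'
--                 now[0] += 1
--                 color = res[now[0]][now[1]]
--         elif d == 'U':
--             if color == '_':
--                 res[now[0]] = res[now[0]][:now[1]] + 'X' + res[now[0]][now[1]+1:]
--                 if now[1] == len(res[0]) - 1:
--                     for i in range(len(res)):
--                         res[i] += '_'    #扩宽右边界
--                 d = 'R'
--                 now[1] += 1
--                 color = res[now[0]][now[1]]
--             else:
--                 res[now[0]] = res[now[0]][:now[1]] + '_' + res[now[0]][now[1]+1:]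
--                 if now[1] == 0:
--                     for i in range(len(res)):
--                         res[i] = '_' + res[i]   #扩宽左边界
--                     now[1] += 1
--                 d = 'L'
--                 now[1] -= 1
--                 color = res[now[0]][now[1]]
--         else:
--             if color == '_':
--                 res[now[0]] = res[now[0]][:now[1]] + 'X' + res[now[0]][now[1]+1:]
--                 if now[1] == 0:
--                     for i in range(len(res)):
--                         res[i] = '_' + res[i]
--                     now[1] += 1
--                 d = 'L'
--                 now[1] -= 1
--                 color = res[now[0]][now[1]]
--             else:
--                 res[now[0]] = res[now[0]][:now[1]] + '_' + res[now[0]][now[1]+1:]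
--                 if now[1] == len(res[0])-1:
--                     for i in range(len(res)):
--                         res[i] += '_'
--                 d = 'R'
--                 now[1] += 1
--                 color = res[now[0]][now[1]]
--     res[now[0]] = res[now[0]][:now[1]] + d + res[now[0]][now[1]+1:]
--     return res
-- ===== SOURCE B (Python) =====
-- def printKMoves(K: int):
--     # Sparse simulation: set of black cells plus a tracked bounding box of the
--     # ant's positions, O(1) per step; the grid is rendered once at the end.
--     black = set()
--     r = c = 0
--     d = 1  # 0=U,1=R,2=D,3=L; white cell -> turn right (+1), black -> left (-1)
--     rmin = rmax = cmin = cmax = 0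
--     k = K
--     while k > 0:
--         k -= 1
--         if (r, c) in black:
--             black.discard((r, c))
--             d = (d - 1) % 4
--         else:
--             black.add((r, c))
--             d = (d + 1) % 4
--         dr, dc = ((-1, 0), (0, 1), (1, 0), (0, -1))[d]
--         r += dr
--         c += dc
--         if r < rmin: rmin = r
--         if r > rmax: rmax = r
--         if c < cmin: cmin = c
--         if c > cmax: cmax = c
--     w = cmax - cmin + 1
--     grid = [bytearray(b'_') * w for _ in range(rmax - rmin + 1)]
--     for (i, j) in black:
--         grid[i - rmin][j - cmin] = 88  # 'X'
--     grid[r - rmin][c - cmin] = ord("URDL"[d])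
--     return [row.decode() for row in grid]
-- ===== Notes on version B (the rewrite author's own statement) =====
-- stated objective: faster
-- what changed: Replaces the dense simulation on a growing list of strings (per-step string re-slicing plus whole-grid row/column insertions on every border touch) by a sparse one: a set of black cells and a tracked bounding box updated in O(1) per step, with the grid rendered once at the end.
import Mathlib
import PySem

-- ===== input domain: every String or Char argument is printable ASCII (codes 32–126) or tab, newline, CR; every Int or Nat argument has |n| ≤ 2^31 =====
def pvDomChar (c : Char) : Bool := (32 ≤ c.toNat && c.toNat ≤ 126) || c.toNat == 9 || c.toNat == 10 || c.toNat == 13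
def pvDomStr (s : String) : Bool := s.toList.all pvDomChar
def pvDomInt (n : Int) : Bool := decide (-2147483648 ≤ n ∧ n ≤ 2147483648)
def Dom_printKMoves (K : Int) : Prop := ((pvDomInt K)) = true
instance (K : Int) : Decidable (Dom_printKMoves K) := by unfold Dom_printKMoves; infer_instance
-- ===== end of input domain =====

-- B replaces A's growing grid-of-strings simulation (string re-slicing and whole-grid
-- expansion at every border touch) by a sparse simulation: a set of black cells plus a
-- tracked bounding box, O(1) per step, with the grid rendered once at the end.

-- ===== PORT A =====
-- Strings are modelled as their character lists (PySem.Chars convention) and turned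
-- into String only on return.  State: (color, res, d, now[0], now[1]).
structure PvStA where
  color : Char
  res : List (List Char)
  d : Char
  i : Int
  j : Int
deriving Repr, DecidableEq

-- res[i] = res[i][:j] + ch + res[i][j+1:]   (index i is provably 0 ≤ i < len(res) at
-- every use, where pyGetD/pySetD agree exactly with Python)
def pvWriteCellA (g : List (List Char)) (i j : Int) (ch : Char) : List (List Char) :=
  let row := PySem.List.pyGetD g i []
  PySem.List.pySetD g i
    (PySem.List.slice row none (some j) ++ [ch] ++ PySem.List.slice row (some (j + 1)) none)

-- '_' * len(res[0])   (exact: Python's s*n is empty for n ≤ 0, like replicate toNat)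
def pvBlankRowA (g : List (List Char)) : List Char :=
  List.replicate ((PySem.List.len (PySem.List.pyGetD g 0 [])).toNat) '_'

def pvStepA (s : PvStA) : PvStA :=
  if s.d = 'R' then
    if s.color = '_' then
      let res1 := pvWriteCellA s.res s.i s.j 'X'
      let res2 := if s.i = PySem.List.len res1 - 1 then res1 ++ [pvBlankRowA res1] else res1
      let i := s.i + 1
      ⟨PySem.List.pyGetD (PySem.List.pyGetD res2 i []) s.j '_', res2, 'D', i, s.j⟩
    else
      let res1 := pvWriteCellA s.res s.i s.j '_'
      let p := if s.i = 0 then (PySem.List.insert res1 0 (pvBlankRowA res1), s.i + 1)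
               else (res1, s.i)
      let i := p.2 - 1
      ⟨PySem.List.pyGetD (PySem.List.pyGetD p.1 i []) s.j '_', p.1, 'U', i, s.j⟩
  else if s.d = 'L' then
    if s.color = '_' then
      let res1 := pvWriteCellA s.res s.i s.j 'X'
      let p := if s.i = 0 then (PySem.List.insert res1 0 (pvBlankRowA res1), s.i + 1)
               else (res1, s.i)
      let i := p.2 - 1
      ⟨PySem.List.pyGetD (PySem.List.pyGetD p.1 i []) s.j '_', p.1, 'U', i, s.j⟩
    else
      let res1 := pvWriteCellA s.res s.i s.j '_'
      let res2 := if s.i = PySem.List.len res1 - 1 then res1 ++ [pvBlankRowA res1] else res1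
      let i := s.i + 1
      ⟨PySem.List.pyGetD (PySem.List.pyGetD res2 i []) s.j '_', res2, 'D', i, s.j⟩
  else if s.d = 'U' then
    if s.color = '_' then
      let res1 := pvWriteCellA s.res s.i s.j 'X'
      -- for i in range(len(res)): res[i] += '_'
      let res2 := if s.j = PySem.List.len (PySem.List.pyGetD res1 0 []) - 1
                  then res1.map (fun row => row ++ ['_']) else res1
      let j := s.j + 1
      ⟨PySem.List.pyGetD (PySem.List.pyGetD res2 s.i []) j '_', res2, 'R', s.i, j⟩
    else
      let res1 := pvWriteCellA s.res s.i s.j '_'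
      -- for i in range(len(res)): res[i] = '_' + res[i]
      let p := if s.j = 0 then (res1.map (fun row => '_' :: row), s.j + 1) else (res1, s.j)
      let j := p.2 - 1
      ⟨PySem.List.pyGetD (PySem.List.pyGetD p.1 s.i []) j '_', p.1, 'L', s.i, j⟩
  else
    if s.color = '_' then
      let res1 := pvWriteCellA s.res s.i s.j 'X'
      let p := if s.j = 0 then (res1.map (fun row => '_' :: row), s.j + 1) else (res1, s.j)
      let j := p.2 - 1
      ⟨PySem.List.pyGetD (PySem.List.pyGetD p.1 s.i []) j '_', p.1, 'L', s.i, j⟩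
    else
      let res1 := pvWriteCellA s.res s.i s.j '_'
      let res2 := if s.j = PySem.List.len (PySem.List.pyGetD res1 0 []) - 1
                  then res1.map (fun row => row ++ ['_']) else res1
      let j := s.j + 1
      ⟨PySem.List.pyGetD (PySem.List.pyGetD res2 s.i []) j '_', res2, 'R', s.i, j⟩

def pvLoopA (K : Int) (s : PvStA) : PvStA :=
  if K > 0 then pvLoopA (K - 1) (pvStepA s) else s
termination_by K.toNat
decreasing_by omega

def printKMoves (K : Int) : List String :=
  let s := pvLoopA K ⟨'_', [['_']], 'R', 0, 0⟩
  (pvWriteCellA s.res s.i s.j s.d).map String.ofList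

-- ===== PORT B =====
structure PvStB where
  black : PySem.Set (Int × Int)
  r : Int
  c : Int
  d : Int
  rmin : Int
  rmax : Int
  cmin : Int
  cmax : Int
deriving Repr, DecidableEq

def pvStepB (s : PvStB) : PvStB :=
  let bd := if PySem.Set.contains s.black (s.r, s.c)
            then (PySem.Set.discard s.black (s.r, s.c), PySem.Int.mod (s.d - 1) 4)
            else (PySem.Set.add s.black (s.r, s.c), PySem.Int.mod (s.d + 1) 4)
  let dv := PySem.List.pyGetD [((-1 : Int), (0 : Int)), (0, 1), (1, 0), (0, -1)] bd.2 (0, 0)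
  let r := s.r + dv.1
  let c := s.c + dv.2
  ⟨bd.1, r, c, bd.2,
    if r < s.rmin then r else s.rmin, if r > s.rmax then r else s.rmax,
    if c < s.cmin then c else s.cmin, if c > s.cmax then c else s.cmax⟩

def pvLoopB (k : Int) (s : PvStB) : PvStB :=
  if k > 0 then pvLoopB (k - 1) (pvStepB s) else s
termination_by k.toNat
decreasing_by omega

-- grid[i][j] = ch   (indices provably in range at every use)
def pvPaintB (g : List (List Char)) (i j : Int) (ch : Char) : List (List Char) :=
  PySem.List.pySetD g i (PySem.List.pySetD (PySem.List.pyGetD g i []) j ch)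

def printKMoves_alt (K : Int) : List String :=
  let s := pvLoopB K ⟨PySem.Set.empty, 0, 0, 1, 0, 0, 0, 0⟩
  let w := s.cmax - s.cmin + 1
  let grid0 := (PySem.List.pyRange 0 (s.rmax - s.rmin + 1) 1).map
                 (fun _ => List.replicate w.toNat '_')
  -- for (i, j) in black: grid[i-rmin][j-cmin] = 'X'   (cells are distinct: order-independent)
  let grid1 := s.black.foldl (fun g p => pvPaintB g (p.1 - s.rmin) (p.2 - s.cmin) 'X') grid0
  let grid2 := pvPaintB grid1 (s.r - s.rmin) (s.c - s.cmin)
                 (PySem.List.pyGetD ['U', 'R', 'D', 'L'] s.d 'U')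
  grid2.map String.ofList

-- ===== PRECONDITION & SPEC =====
def Spec_printKMoves (K : Int) (out : List String) : Prop := out = printKMoves_alt K
instance (K : Int) (out : List String) : Decidable (Spec_printKMoves K out) := by unfold Spec_printKMoves; infer_instance

-- ===== CLAIM (what is proved, stated in full; the proofs are below) =====
def Claim_equal_printKMoves : Prop := ∀ (K : Int), Dom_printKMoves K → Spec_printKMoves K (printKMoves K)

-- ===== LEMMAS AND PROOFS =====

def pvCell (g : List (List Char)) (i j : Nat) : Char := (g.getD i []).getD j '?'
def pvDims (g : List (List Char)) (hh ww : Nat) : Prop := g.length = hh ∧ ∀ row ∈ g, row.length = ww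

theorem pvGetD_set_self (g : List (List Char)) (row : List Char) {i : Nat} (hi : i < g.length) :
    (g.set i row).getD i [] = row := by
  simp [List.getD_eq_getElem?_getD, List.getElem?_set_self hi]

theorem pvGetD_set_ne (g : List (List Char)) (row : List Char) {i i' : Nat} (h : i ≠ i') :
    (g.set i row).getD i' [] = g.getD i' [] := by
  simp [List.getD_eq_getElem?_getD, List.getElem?_set_ne h]

theorem pvRowD_set_self (l : List Char) (ch : Char) {j : Nat} (hj : j < l.length) (d : Char) :
    (l.set j ch).getD j d = ch := by
  simp [List.getD_eq_getElem?_getD, List.getElem?_set_self hj]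

theorem pvRowD_set_ne (l : List Char) (ch : Char) {j j' : Nat} (h : j ≠ j') (d : Char) :
    (l.set j ch).getD j' d = l.getD j' d := by
  simp [List.getD_eq_getElem?_getD, List.getElem?_set_ne h]

theorem pvRowD_irrel (l : List Char) {j : Nat} (hj : j < l.length) (d d' : Char) :
    l.getD j d = l.getD j d' := by
  simp [List.getD_eq_getElem?_getD, List.getElem?_eq_getElem hj]

theorem pvDims_rowlen {g : List (List Char)} {hh ww : Nat} (hd : pvDims g hh ww)
    {i : Nat} (hi : i < hh) : (g.getD i []).length = ww := by
  obtain ⟨h1, h2⟩ := hd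
  have : g.getD i [] ∈ g := by
    rw [List.getD_eq_getElem?_getD, List.getElem?_eq_getElem (by omega)]
    exact List.getElem_mem _
  exact h2 _ this

theorem pvCell_eq_getD {g : List (List Char)} {hh ww : Nat} (hd : pvDims g hh ww)
    {i j : Nat} (hi : i < hh) (hj : j < ww) (d : Char) :
    (g.getD i []).getD j d = pvCell g i j := by
  have hr := pvDims_rowlen hd hi
  exact pvRowD_irrel _ (by omega) d '?'

theorem pvDims_set {g : List (List Char)} {hh ww : Nat} (hd : pvDims g hh ww)
    {i : Nat} {row : List Char} (hrow : row.length = ww) :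
    pvDims (g.set i row) hh ww := by
  obtain ⟨h1, h2⟩ := hd
  refine ⟨by simpa using h1, fun r hr => ?_⟩
  rcases List.mem_or_eq_of_mem_set hr with h | h
  · exact h2 _ h
  · subst h; exact hrow

theorem pvCell_set {g : List (List Char)} {i j : Nat} {ch : Char}
    (hi : i < g.length) (hj : j < (g.getD i []).length) (i' j' : Nat) :
    pvCell (g.set i ((g.getD i []).set j ch)) i' j' =
      if i' = i ∧ j' = j then ch else pvCell g i' j' := by
  unfold pvCell
  by_cases h : i' = i
  · subst h
    rw [pvGetD_set_self _ _ hi]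
    by_cases h2 : j' = j
    · subst h2
      rw [pvRowD_set_self _ _ hj]
      simp
    · rw [pvRowD_set_ne _ _ (by omega)]
      simp [h2]
  · rw [pvGetD_set_ne _ _ (by omega)]
    simp [h]

theorem pvGetD_map (g : List (List Char)) (f : List Char → List Char) {i : Nat}
    (hi : i < g.length) : (g.map f).getD i [] = f (g.getD i []) := by
  simp [List.getD_eq_getElem?_getD, List.getElem?_eq_getElem hi,
        List.getElem?_eq_getElem (show i < (g.map f).length by simpa using hi)]

theorem pvCell_append {g : List (List Char)} {row : List Char} {i : Nat} (j : Nat)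
    (hi : i < g.length) : pvCell (g ++ [row]) i j = pvCell g i j := by
  unfold pvCell
  rw [show (g ++ [row]).getD i [] = g.getD i [] by
        simp [List.getD_eq_getElem?_getD, List.getElem?_append_left hi]]

theorem pvCell_append_last {g : List (List Char)} {row : List Char} (j : Nat) :
    pvCell (g ++ [row]) g.length j = row.getD j '?' := by
  unfold pvCell
  rw [show (g ++ [row]).getD g.length [] = row by
        simp [List.getD_eq_getElem?_getD]]

theorem pvCell_cons_zero (row : List Char) (g : List (List Char)) (j : Nat) :
    pvCell (row :: g) 0 j = row.getD j '?' := rfl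

theorem pvCell_cons_succ (row : List Char) (g : List (List Char)) (i j : Nat) :
    pvCell (row :: g) (i + 1) j = pvCell g i j := rfl

theorem pvCell_widenR {g : List (List Char)} {hh ww : Nat} (hd : pvDims g hh ww)
    {i : Nat} (j : Nat) (hi : i < hh) :
    pvCell (g.map (fun r => r ++ ['_'])) i j =
      if j < ww then pvCell g i j else if j = ww then '_' else '?' := by
  have hlen : i < g.length := by have := hd.1; omega
  have hrow := pvDims_rowlen hd hi
  unfold pvCell
  rw [pvGetD_map _ _ hlen]
  rcases Nat.lt_trichotomy j ww with h | h | h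
  · rw [if_pos h, List.getD_append _ _ _ _ (by omega)]
  · subst h
    rw [if_neg (by omega), if_pos rfl, List.getD_eq_getElem?_getD, ← hrow,
        List.getElem?_concat_length]
    rfl
  · rw [if_neg (by omega), if_neg (by omega), List.getD_eq_getElem?_getD,
        List.getElem?_eq_none (by simp only [List.length_append, List.length_singleton, hrow]; omega)]
    rfl

theorem pvCell_widenL {g : List (List Char)} {hh ww : Nat} (hd : pvDims g hh ww)
    {i : Nat} (hi : i < hh) :
    pvCell (g.map (fun r => '_' :: r)) i 0 = '_' ∧
      ∀ j : Nat, pvCell (g.map (fun r => '_' :: r)) i (j + 1) = pvCell g i j := by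
  have hlen : i < g.length := by have := hd.1; omega
  unfold pvCell
  rw [pvGetD_map _ _ hlen]
  exact ⟨rfl, fun j => rfl⟩

theorem pvDims_append {g : List (List Char)} {hh ww : Nat} (hd : pvDims g hh ww)
    {row : List Char} (hrow : row.length = ww) : pvDims (g ++ [row]) (hh + 1) ww := by
  obtain ⟨h1, h2⟩ := hd
  refine ⟨by simp [h1], fun r hr => ?_⟩
  rcases List.mem_append.1 hr with h | h
  · exact h2 _ h
  · simp at h; subst h; exact hrow

theorem pvDims_cons {g : List (List Char)} {hh ww : Nat} (hd : pvDims g hh ww)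
    {row : List Char} (hrow : row.length = ww) : pvDims (row :: g) (hh + 1) ww := by
  obtain ⟨h1, h2⟩ := hd
  refine ⟨by simp [h1], fun r hr => ?_⟩
  rcases List.mem_cons.1 hr with h | h
  · subst h; exact hrow
  · exact h2 _ h

theorem pvDims_mapR {g : List (List Char)} {hh ww : Nat} (hd : pvDims g hh ww) :
    pvDims (g.map (fun r => r ++ ['_'])) hh (ww + 1) := by
  obtain ⟨h1, h2⟩ := hd
  refine ⟨by simp [h1], fun r hr => ?_⟩
  obtain ⟨r0, hr0, rfl⟩ := List.mem_map.1 hr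
  simp [h2 _ hr0]

theorem pvDims_mapL {g : List (List Char)} {hh ww : Nat} (hd : pvDims g hh ww) :
    pvDims (g.map (fun r => '_' :: r)) hh (ww + 1) := by
  obtain ⟨h1, h2⟩ := hd
  refine ⟨by simp [h1], fun r hr => ?_⟩
  obtain ⟨r0, hr0, rfl⟩ := List.mem_map.1 hr
  simp [h2 _ hr0]

def pvRel (g : List (List Char)) (black : List (Int × Int)) (rmin rmax cmin cmax : Int) : Prop :=
  rmin ≤ 0 ∧ 0 ≤ rmax ∧ cmin ≤ 0 ∧ 0 ≤ cmax ∧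
  pvDims g (rmax - rmin + 1).toNat (cmax - cmin + 1).toNat ∧
  (∀ i j : Nat, i < (rmax - rmin + 1).toNat → j < (cmax - cmin + 1).toNat →
    pvCell g i j = if ((rmin + i : Int), (cmin + j : Int)) ∈ black then 'X' else '_') ∧
  (∀ p ∈ black, rmin ≤ p.1 ∧ p.1 ≤ rmax ∧ cmin ≤ p.2 ∧ p.2 ≤ cmax)

theorem pvSetCell_eq {g : List (List Char)} {hh ww : Nat} (hd : pvDims g hh ww)
    {i j : Int} (ch : Char) (hi0 : 0 ≤ i) (hi : i < (hh : Int)) (hj0 : 0 ≤ j)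
    (hj : j < (ww : Int)) :
    PySem.List.pySetD g i (PySem.List.slice (PySem.List.pyGetD g i []) none (some j) ++ [ch]
        ++ PySem.List.slice (PySem.List.pyGetD g i []) (some (j + 1)) none)
      = g.set i.toNat ((g.getD i.toNat []).set j.toNat ch) := by
  have hlen : i.toNat < g.length := by have := hd.1; omega
  have hget : PySem.List.pyGetD g i [] = g.getD i.toNat [] :=
    PySem.List.pyGetD_of_nonneg g [] hi0
  have hrow : (g.getD i.toNat []).length = ww := pvDims_rowlen hd (by omega)
  rw [hget, PySem.List.slice_to _ hj0, PySem.List.slice_from _ (by omega),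
      PySem.List.pySetD_of_nonneg _ _ hi0,
      show (j + 1).toNat = j.toNat + 1 by omega,
      List.set_eq_take_cons_drop ch (by omega)]
  simp

theorem pvWriteCellA_eq {g : List (List Char)} {hh ww : Nat} (hd : pvDims g hh ww)
    {i j : Int} (ch : Char) (hi0 : 0 ≤ i) (hi : i < (hh : Int)) (hj0 : 0 ≤ j)
    (hj : j < (ww : Int)) :
    pvWriteCellA g i j ch = g.set i.toNat ((g.getD i.toNat []).set j.toNat ch) := by
  unfold pvWriteCellA
  exact pvSetCell_eq hd ch hi0 hi hj0 hj

theorem pvPaintB_eq {g : List (List Char)} {hh ww : Nat} (hd : pvDims g hh ww)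
    {i j : Int} (ch : Char) (hi0 : 0 ≤ i) (hi : i < (hh : Int)) (hj0 : 0 ≤ j)
    (_hj : j < (ww : Int)) :
    pvPaintB g i j ch = g.set i.toNat ((g.getD i.toNat []).set j.toNat ch) := by
  have hlen : i.toNat < g.length := by have := hd.1; omega
  have hget : PySem.List.pyGetD g i [] = g.getD i.toNat [] :=
    PySem.List.pyGetD_of_nonneg g [] hi0
  have hrow : (g.getD i.toNat []).length = ww := pvDims_rowlen hd (by omega)
  unfold pvPaintB
  rw [hget, PySem.List.pySetD_of_nonneg _ _ hj0, PySem.List.pySetD_of_nonneg _ _ hi0]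

theorem pvRel_write {g : List (List Char)} {black : List (Int × Int)} {rmin rmax cmin cmax : Int}
    (hrel : pvRel g black rmin rmax cmin cmax) {r c : Int}
    (hr1 : rmin ≤ r) (hr2 : r ≤ rmax) (hc1 : cmin ≤ c) (hc2 : c ≤ cmax)
    {ch : Char} (hch : ch = 'X' ∨ ch = '_') {black' : List (Int × Int)}
    (hmem : ∀ q : Int × Int, q ∈ black' ↔ if q = (r, c) then ch = 'X' else q ∈ black) :
    pvRel (pvWriteCellA g (r - rmin) (c - cmin) ch) black' rmin rmax cmin cmax := by
  obtain ⟨b1, b2, b3, b4, hd, hcell, hbb⟩ := hrel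
  have hW : ((cmax - cmin + 1).toNat : Int) = cmax - cmin + 1 := by omega
  have hH : ((rmax - rmin + 1).toNat : Int) = rmax - rmin + 1 := by omega
  rw [pvWriteCellA_eq hd ch (by omega) (by omega) (by omega) (by omega)]
  have hlen : (r - rmin).toNat < g.length := by have := hd.1; omega
  have hrow : (g.getD (r - rmin).toNat []).length = (cmax - cmin + 1).toNat :=
    pvDims_rowlen hd (by omega)
  refine ⟨b1, b2, b3, b4, pvDims_set hd (by rw [List.length_set, hrow]), ?_, ?_⟩
  · intro i j hi hj
    rw [pvCell_set hlen (by omega) i j]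
    by_cases hq : ((rmin + i : Int), (cmin + j : Int)) = (r, c)
    · have h1 : i = (r - rmin).toNat := by
        have := congrArg Prod.fst hq; simp at this; omega
      have h2 : j = (c - cmin).toNat := by
        have := congrArg Prod.snd hq; simp at this; omega
      rw [if_pos ⟨h1, h2⟩]
      rcases hch with h | h
      · subst h
        have hmm : ((rmin + i : Int), (cmin + j : Int)) ∈ black' := by
          have := hmem ((rmin + i : Int), (cmin + j : Int))
          rw [if_pos hq] at this
          exact this.2 rfl
        rw [if_pos hmm]
      · subst h
        have hmm : ((rmin + i : Int), (cmin + j : Int)) ∉ black' := by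
          intro hc
          have := (hmem _).1 hc
          rw [if_pos hq] at this
          exact absurd this (by decide)
        rw [if_neg hmm]
    · have hne : ¬ (i = (r - rmin).toNat ∧ j = (c - cmin).toNat) := by
        intro ⟨h1, h2⟩
        exact hq (by subst h1; subst h2; simp; constructor <;> omega)
      rw [if_neg hne, hcell i j hi hj]
      have := hmem ((rmin + i : Int), (cmin + j : Int))
      rw [if_neg hq] at this
      by_cases hb : ((rmin + i : Int), (cmin + j : Int)) ∈ black
      · rw [if_pos hb, if_pos (this.2 hb)]
      · rw [if_neg hb, if_neg (fun hx => hb (this.1 hx))]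
  · intro p hp
    have := (hmem p).1 hp
    by_cases hq : p = (r, c)
    · subst hq; exact ⟨hr1, hr2, hc1, hc2⟩
    · rw [if_neg hq] at this; exact hbb p this

theorem pvRel_read {g : List (List Char)} {black : List (Int × Int)} {rmin rmax cmin cmax : Int}
    (hrel : pvRel g black rmin rmax cmin cmax) {r c : Int}
    (hr1 : rmin ≤ r) (hr2 : r ≤ rmax) (hc1 : cmin ≤ c) (hc2 : c ≤ cmax) :
    PySem.List.pyGetD (PySem.List.pyGetD g (r - rmin) []) (c - cmin) '_'
      = if (r, c) ∈ black then 'X' else '_' := by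
  obtain ⟨b1, b2, b3, b4, hd, hcell, hbb⟩ := hrel
  rw [PySem.List.pyGetD_of_nonneg g [] (by omega),
      PySem.List.pyGetD_of_nonneg _ '_' (by omega),
      pvCell_eq_getD hd (show (r - rmin).toNat < _ by omega) (show (c - cmin).toNat < _ by omega),
      hcell _ _ (by omega) (by omega)]
  have h1 : rmin + ((r - rmin).toNat : Int) = r := by omega
  have h2 : cmin + ((c - cmin).toNat : Int) = c := by omega
  rw [h1, h2]

theorem pvBlankRowA_eq {g : List (List Char)} {hh ww : Nat} (hd : pvDims g hh ww)
    (h : 0 < hh) : pvBlankRowA g = List.replicate ww '_' := by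
  unfold pvBlankRowA
  rw [PySem.List.pyGetD_of_nonneg g [] (by omega)]
  have h2 : (g.getD (0 : Int).toNat []).length = ww := pvDims_rowlen hd h
  simp only [PySem.List.len_eq, h2, Int.toNat_natCast]

theorem pvRel_growD {g : List (List Char)} {black : List (Int × Int)} {rmin rmax cmin cmax : Int}
    (hrel : pvRel g black rmin rmax cmin cmax) :
    pvRel (g ++ [List.replicate (cmax - cmin + 1).toNat '_']) black rmin (rmax + 1) cmin cmax := by
  obtain ⟨b1, b2, b3, b4, hd, hcell, hbb⟩ := hrel
  have hH : (rmax + 1 - rmin + 1).toNat = (rmax - rmin + 1).toNat + 1 := by omega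
  refine ⟨b1, by omega, b3, b4, by rw [hH]; exact pvDims_append hd (by simp), ?_, ?_⟩
  · intro i j hi hj
    rcases Nat.lt_or_ge i (rmax - rmin + 1).toNat with h | h
    · rw [pvCell_append j (by have := hd.1; omega), hcell i j h hj]
    · have hieq : i = (rmax - rmin + 1).toNat := by omega
      have : i = g.length := by have := hd.1; omega
      subst this
      rw [pvCell_append_last j, List.getD_replicate _ (by omega)]
      rw [if_neg ?_]
      intro hmm
      have := (hbb _ hmm).2.1
      simp at this
      omega
  · intro p hp
    have := hbb p hp
    exact ⟨this.1, by omega, this.2.2⟩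

theorem pvRel_growU {g : List (List Char)} {black : List (Int × Int)} {rmin rmax cmin cmax : Int}
    (hrel : pvRel g black rmin rmax cmin cmax) :
    pvRel (List.replicate (cmax - cmin + 1).toNat '_' :: g) black (rmin - 1) rmax cmin cmax := by
  obtain ⟨b1, b2, b3, b4, hd, hcell, hbb⟩ := hrel
  have hH : (rmax - (rmin - 1) + 1).toNat = (rmax - rmin + 1).toNat + 1 := by omega
  refine ⟨by omega, b2, b3, b4, by rw [hH]; exact pvDims_cons hd (by simp), ?_, ?_⟩
  · intro i j hi hj
    match i with
    | 0 =>
      rw [pvCell_cons_zero, List.getD_replicate _ (by omega), if_neg ?_]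
      intro hmm
      have := (hbb _ hmm).1
      push_cast at this
      omega
    | i + 1 =>
      rw [pvCell_cons_succ, hcell i j (by omega) hj]
      have : rmin - 1 + ((i : Int) + 1) = rmin + i := by omega
      push_cast
      rw [this]
  · intro p hp
    have := hbb p hp
    exact ⟨by omega, this.2⟩

theorem pvRel_growR {g : List (List Char)} {black : List (Int × Int)} {rmin rmax cmin cmax : Int}
    (hrel : pvRel g black rmin rmax cmin cmax) :
    pvRel (g.map (fun r => r ++ ['_'])) black rmin rmax cmin (cmax + 1) := by
  obtain ⟨b1, b2, b3, b4, hd, hcell, hbb⟩ := hrel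
  have hW : (cmax + 1 - cmin + 1).toNat = (cmax - cmin + 1).toNat + 1 := by omega
  refine ⟨b1, b2, b3, by omega, by rw [hW]; exact pvDims_mapR hd, ?_, ?_⟩
  · intro i j hi hj
    rw [pvCell_widenR hd j (by omega)]
    rcases Nat.lt_trichotomy j (cmax - cmin + 1).toNat with h | h | h
    · rw [if_pos h, hcell i j (by omega) h]
    · subst h
      rw [if_neg (by omega), if_pos rfl, if_neg ?_]
      intro hmm
      have := (hbb _ hmm).2.2.2
      simp at this
      omega
    · omega
  · intro p hp
    have := hbb p hp
    exact ⟨this.1, this.2.1, this.2.2.1, by omega⟩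

theorem pvRel_growL {g : List (List Char)} {black : List (Int × Int)} {rmin rmax cmin cmax : Int}
    (hrel : pvRel g black rmin rmax cmin cmax) :
    pvRel (g.map (fun r => '_' :: r)) black rmin rmax (cmin - 1) cmax := by
  obtain ⟨b1, b2, b3, b4, hd, hcell, hbb⟩ := hrel
  have hW : (cmax - (cmin - 1) + 1).toNat = (cmax - cmin + 1).toNat + 1 := by omega
  refine ⟨b1, b2, by omega, b4, by rw [hW]; exact pvDims_mapL hd, ?_, ?_⟩
  · intro i j hi hj
    match j with
    | 0 =>
      rw [(pvCell_widenL hd (by omega)).1, if_neg ?_]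
      intro hmm
      have := (hbb _ hmm).2.2.1
      push_cast at this
      omega
    | j + 1 =>
      rw [(pvCell_widenL hd (by omega)).2 j, hcell i j (by omega) (by omega)]
      have : cmin - 1 + ((j : Int) + 1) = cmin + j := by omega
      push_cast
      rw [this]
  · intro p hp
    have := hbb p hp
    exact ⟨this.1, this.2.1, by omega, this.2.2.2⟩

def pvInv (a : PvStA) (b : PvStB) : Prop :=
  pvRel a.res b.black b.rmin b.rmax b.cmin b.cmax ∧
  b.rmin ≤ b.r ∧ b.r ≤ b.rmax ∧ b.cmin ≤ b.c ∧ b.c ≤ b.cmax ∧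
  a.i = b.r - b.rmin ∧ a.j = b.c - b.cmin ∧
  a.color = (if (b.r, b.c) ∈ b.black then 'X' else '_') ∧
  a.d = PySem.List.pyGetD ['U', 'R', 'D', 'L'] b.d 'U' ∧
  (b.d = 0 ∨ b.d = 1 ∨ b.d = 2 ∨ b.d = 3)

theorem pvMem_add_ite (s : PySem.Set (Int × Int)) (p q : Int × Int) :
    q ∈ PySem.Set.add s p ↔ if q = p then ('X' : Char) = 'X' else q ∈ s := by
  rw [PySem.Set.mem_add]
  by_cases h : q = p
  · simp [h]
  · simp [h]

theorem pvMem_discard_ite (s : PySem.Set (Int × Int)) (p q : Int × Int) :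
    q ∈ PySem.Set.discard s p ↔ if q = p then ('_' : Char) = 'X' else q ∈ s := by
  rw [PySem.Set.mem_discard]
  by_cases h : q = p
  · simp [h]
  · simp [h]

theorem pvRel_lenH {g : List (List Char)} {black : List (Int × Int)} {rmin rmax cmin cmax : Int}
    (hrel : pvRel g black rmin rmax cmin cmax) : PySem.List.len g = rmax - rmin + 1 := by
  obtain ⟨b1, b2, _, _, hd, _, _⟩ := hrel
  rw [PySem.List.len_eq, hd.1]
  omega

theorem pvRel_lenW {g : List (List Char)} {black : List (Int × Int)} {rmin rmax cmin cmax : Int}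
    (hrel : pvRel g black rmin rmax cmin cmax) :
    PySem.List.len (PySem.List.pyGetD g 0 []) = cmax - cmin + 1 := by
  have hr := pvDims_rowlen hrel.2.2.2.2.1 (show (0:Int).toNat < (rmax - rmin + 1).toNat by
    have := hrel.1; have := hrel.2.1; omega)
  rw [PySem.List.pyGetD_of_nonneg g [] (by omega), PySem.List.len_eq, hr]
  have := hrel.2.2.1
  have := hrel.2.2.2.1
  omega

theorem pvStep_inv {a : PvStA} {b : PvStB} (h : pvInv a b) : pvInv (pvStepA a) (pvStepB b) := by
  obtain ⟨ac, ar, ad, ai, aj⟩ := a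
  obtain ⟨bb, br, bc, bd, brm, brx, bcm, bcx⟩ := b
  obtain ⟨hrel, hr1, hr2, hc1, hc2, hi, hj, hcol, hd, hd4⟩ := h
  simp only at hrel hr1 hr2 hc1 hc2 hi hj hcol hd hd4 ⊢
  subst hi hj hcol hd
  by_cases hm : (br, bc) ∈ bb
  all_goals rcases hd4 with hd0 | hd0 | hd0 | hd0 <;> subst hd0
  -- black cell, d = 0 ('U'): turn to 3, move L
  · have hB : pvStepB ⟨bb, br, bc, 0, brm, brx, bcm, bcx⟩ =
        ⟨PySem.Set.discard bb (br, bc), br, bc - 1, 3, brm, brx, if bc - 1 < bcm then bc - 1 else bcm, bcx⟩ := by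
      simp [pvStepB, hm,
        show PySem.List.pyGetD [((-1 : Int), (0 : Int)), (0, 1), (1, 0), (0, -1)] 3 (0, 0)
          = (0, -1) from by decide]
      repeat' apply And.intro
      all_goals (try split_ifs) <;> omega
    rw [hB, if_pos hm, show PySem.List.pyGetD ['U', 'R', 'D', 'L'] (0 : Int) 'U' = 'U' from by decide]
    have hrel1 : pvRel (pvWriteCellA ar (br - brm) (bc - bcm) '_') (PySem.Set.discard bb (br, bc)) brm brx bcm bcx :=
      pvRel_write hrel hr1 hr2 hc1 hc2 (Or.inr rfl) (fun q => pvMem_discard_ite bb (br, bc) q)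
    have hd1 := hrel1.2.2.2.2.1
    have hlh := pvRel_lenH hrel1
    have hlw := pvRel_lenW hrel1
    have hbr : pvBlankRowA (pvWriteCellA ar (br - brm) (bc - bcm) '_') = List.replicate (bcx - bcm + 1).toNat '_' :=
      pvBlankRowA_eq hd1 (by omega)
    generalize hg1 : pvWriteCellA ar (br - brm) (bc - bcm) '_' = R1 at hrel1 hd1 hlh hlw hbr ⊢
    by_cases hx : bc = bcm
    · have hcnd : (bc - bcm = 0) := by
        omega
      have hrel2 := pvRel_growL hrel1
      simp only [pvStepA, eq_true hcnd, hg1, show ('U' : Char) ≠ 'R' from by decide, show ('U' : Char) ≠ 'L' from by decide, show ('X' : Char) ≠ '_' from by decide, if_true, if_false]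
      simp only [pvInv]
      rw [show (if bc - 1 < bcm then bc - 1 else bcm) = bcm - 1 from by split_ifs <;> omega]
      refine ⟨hrel2, by omega, by omega, by omega, by omega, by trivial, by omega, ?_, by decide, by decide⟩
      have hrd := pvRel_read hrel2 (r := br) (c := bc - 1) (by omega) (by omega) (by omega) (by omega)
      rw [show (bc - bcm + 1 - 1 : Int) = bc - 1 - (bcm - 1) from by omega]
      exact hrd
    · have hcnd : ¬ (bc - bcm = 0) := by
        omega
      have hrel2 := hrel1
      simp only [pvStepA, eq_false hcnd, hg1, show ('U' : Char) ≠ 'R' from by decide, show ('U' : Char) ≠ 'L' from by decide, show ('X' : Char) ≠ '_' from by decide, if_true, if_false]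
      simp only [pvInv]
      rw [show (if bc - 1 < bcm then bc - 1 else bcm) = bcm from by split_ifs <;> omega]
      refine ⟨hrel2, by omega, by omega, by omega, by omega, by trivial, by omega, ?_, by decide, by decide⟩
      have hrd := pvRel_read hrel2 (r := br) (c := bc - 1) (by omega) (by omega) (by omega) (by omega)
      rw [show (bc - bcm - 1 : Int) = bc - 1 - bcm from by omega]
      exact hrd
  -- black cell, d = 1 ('R'): turn to 0, move U
  · have hB : pvStepB ⟨bb, br, bc, 1, brm, brx, bcm, bcx⟩ =
        ⟨PySem.Set.discard bb (br, bc), br - 1, bc, 0, if br - 1 < brm then br - 1 else brm, brx, bcm, bcx⟩ := by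
      simp [pvStepB, hm,
        show PySem.List.pyGetD [((-1 : Int), (0 : Int)), (0, 1), (1, 0), (0, -1)] 0 (0, 0)
          = (-1, 0) from by decide]
      repeat' apply And.intro
      all_goals (try split_ifs) <;> omega
    rw [hB, if_pos hm, show PySem.List.pyGetD ['U', 'R', 'D', 'L'] (1 : Int) 'U' = 'R' from by decide]
    have hrel1 : pvRel (pvWriteCellA ar (br - brm) (bc - bcm) '_') (PySem.Set.discard bb (br, bc)) brm brx bcm bcx :=
      pvRel_write hrel hr1 hr2 hc1 hc2 (Or.inr rfl) (fun q => pvMem_discard_ite bb (br, bc) q)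
    have hd1 := hrel1.2.2.2.2.1
    have hlh := pvRel_lenH hrel1
    have hlw := pvRel_lenW hrel1
    have hbr : pvBlankRowA (pvWriteCellA ar (br - brm) (bc - bcm) '_') = List.replicate (bcx - bcm + 1).toNat '_' :=
      pvBlankRowA_eq hd1 (by omega)
    generalize hg1 : pvWriteCellA ar (br - brm) (bc - bcm) '_' = R1 at hrel1 hd1 hlh hlw hbr ⊢
    by_cases hx : br = brm
    · have hcnd : (br - brm = 0) := by
        omega
      have hrel2 := pvRel_growU hrel1
      simp only [pvStepA, eq_true hcnd, hg1, show ('X' : Char) ≠ '_' from by decide, hbr, PySem.List.insert_zero, if_true, if_false]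
      simp only [pvInv]
      rw [show (if br - 1 < brm then br - 1 else brm) = brm - 1 from by split_ifs <;> omega]
      refine ⟨hrel2, by omega, by omega, by omega, by omega, by omega, by trivial, ?_, by decide, by decide⟩
      have hrd := pvRel_read hrel2 (r := br - 1) (c := bc) (by omega) (by omega) (by omega) (by omega)
      rw [show (br - brm + 1 - 1 : Int) = br - 1 - (brm - 1) from by omega]
      exact hrd
    · have hcnd : ¬ (br - brm = 0) := by
        omega
      have hrel2 := hrel1
      simp only [pvStepA, eq_false hcnd, hg1, show ('X' : Char) ≠ '_' from by decide, if_true, if_false]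
      simp only [pvInv]
      rw [show (if br - 1 < brm then br - 1 else brm) = brm from by split_ifs <;> omega]
      refine ⟨hrel2, by omega, by omega, by omega, by omega, by omega, by trivial, ?_, by decide, by decide⟩
      have hrd := pvRel_read hrel2 (r := br - 1) (c := bc) (by omega) (by omega) (by omega) (by omega)
      rw [show (br - brm - 1 : Int) = br - 1 - brm from by omega]
      exact hrd
  -- black cell, d = 2 ('D'): turn to 1, move R
  · have hB : pvStepB ⟨bb, br, bc, 2, brm, brx, bcm, bcx⟩ =
        ⟨PySem.Set.discard bb (br, bc), br, bc + 1, 1, brm, brx, bcm, if bc + 1 > bcx then bc + 1 else bcx⟩ := by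
      simp [pvStepB, hm,
        show PySem.List.pyGetD [((-1 : Int), (0 : Int)), (0, 1), (1, 0), (0, -1)] 1 (0, 0)
          = (0, 1) from by decide]
      repeat' apply And.intro
      all_goals omega
    rw [hB, if_pos hm, show PySem.List.pyGetD ['U', 'R', 'D', 'L'] (2 : Int) 'U' = 'D' from by decide]
    have hrel1 : pvRel (pvWriteCellA ar (br - brm) (bc - bcm) '_') (PySem.Set.discard bb (br, bc)) brm brx bcm bcx :=
      pvRel_write hrel hr1 hr2 hc1 hc2 (Or.inr rfl) (fun q => pvMem_discard_ite bb (br, bc) q)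
    have hd1 := hrel1.2.2.2.2.1
    have hlh := pvRel_lenH hrel1
    have hlw := pvRel_lenW hrel1
    have hbr : pvBlankRowA (pvWriteCellA ar (br - brm) (bc - bcm) '_') = List.replicate (bcx - bcm + 1).toNat '_' :=
      pvBlankRowA_eq hd1 (by omega)
    generalize hg1 : pvWriteCellA ar (br - brm) (bc - bcm) '_' = R1 at hrel1 hd1 hlh hlw hbr ⊢
    by_cases hx : bc = bcx
    · have hcnd : (bc - bcm = PySem.List.len (PySem.List.pyGetD R1 0 []) - 1) := by
        rw [hlw]; omega
      have hrel2 := pvRel_growR hrel1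
      simp only [pvStepA, eq_true hcnd, hg1, show ('D' : Char) ≠ 'R' from by decide, show ('D' : Char) ≠ 'L' from by decide, show ('D' : Char) ≠ 'U' from by decide, show ('X' : Char) ≠ '_' from by decide, if_true, if_false]
      simp only [pvInv]
      rw [show (if bc + 1 > bcx then bc + 1 else bcx) = bcx + 1 from by split_ifs <;> omega]
      refine ⟨hrel2, by omega, by omega, by omega, by omega, by trivial, by omega, ?_, by decide, by decide⟩
      have hrd := pvRel_read hrel2 (r := br) (c := bc + 1) (by omega) (by omega) (by omega) (by omega)
      rw [show (bc - bcm + 1 : Int) = bc + 1 - bcm from by omega]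
      exact hrd
    · have hcnd : ¬ (bc - bcm = PySem.List.len (PySem.List.pyGetD R1 0 []) - 1) := by
        rw [hlw]; omega
      have hrel2 := hrel1
      simp only [pvStepA, eq_false hcnd, hg1, show ('D' : Char) ≠ 'R' from by decide, show ('D' : Char) ≠ 'L' from by decide, show ('D' : Char) ≠ 'U' from by decide, show ('X' : Char) ≠ '_' from by decide, if_false]
      simp only [pvInv]
      rw [show (if bc + 1 > bcx then bc + 1 else bcx) = bcx from by split_ifs <;> omega]
      refine ⟨hrel2, by omega, by omega, by omega, by omega, by trivial, by omega, ?_, by decide, by decide⟩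
      have hrd := pvRel_read hrel2 (r := br) (c := bc + 1) (by omega) (by omega) (by omega) (by omega)
      rw [show (bc - bcm + 1 : Int) = bc + 1 - bcm from by omega]
      exact hrd
  -- black cell, d = 3 ('L'): turn to 2, move D
  · have hB : pvStepB ⟨bb, br, bc, 3, brm, brx, bcm, bcx⟩ =
        ⟨PySem.Set.discard bb (br, bc), br + 1, bc, 2, brm, if br + 1 > brx then br + 1 else brx, bcm, bcx⟩ := by
      simp [pvStepB, hm,
        show PySem.List.pyGetD [((-1 : Int), (0 : Int)), (0, 1), (1, 0), (0, -1)] 2 (0, 0)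
          = (1, 0) from by decide]
      repeat' apply And.intro
      all_goals omega
    rw [hB, if_pos hm, show PySem.List.pyGetD ['U', 'R', 'D', 'L'] (3 : Int) 'U' = 'L' from by decide]
    have hrel1 : pvRel (pvWriteCellA ar (br - brm) (bc - bcm) '_') (PySem.Set.discard bb (br, bc)) brm brx bcm bcx :=
      pvRel_write hrel hr1 hr2 hc1 hc2 (Or.inr rfl) (fun q => pvMem_discard_ite bb (br, bc) q)
    have hd1 := hrel1.2.2.2.2.1
    have hlh := pvRel_lenH hrel1
    have hlw := pvRel_lenW hrel1
    have hbr : pvBlankRowA (pvWriteCellA ar (br - brm) (bc - bcm) '_') = List.replicate (bcx - bcm + 1).toNat '_' :=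
      pvBlankRowA_eq hd1 (by omega)
    generalize hg1 : pvWriteCellA ar (br - brm) (bc - bcm) '_' = R1 at hrel1 hd1 hlh hlw hbr ⊢
    by_cases hx : br = brx
    · have hcnd : (br - brm = PySem.List.len R1 - 1) := by
        rw [hlh]; omega
      have hrel2 := pvRel_growD hrel1
      simp only [pvStepA, eq_true hcnd, hg1, show ('L' : Char) ≠ 'R' from by decide, show ('X' : Char) ≠ '_' from by decide, hbr, PySem.List.insert_zero, if_true, if_false]
      simp only [pvInv]
      rw [show (if br + 1 > brx then br + 1 else brx) = brx + 1 from by split_ifs <;> omega]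
      refine ⟨hrel2, by omega, by omega, by omega, by omega, by omega, by trivial, ?_, by decide, by decide⟩
      have hrd := pvRel_read hrel2 (r := br + 1) (c := bc) (by omega) (by omega) (by omega) (by omega)
      rw [show (br - brm + 1 : Int) = br + 1 - brm from by omega]
      exact hrd
    · have hcnd : ¬ (br - brm = PySem.List.len R1 - 1) := by
        rw [hlh]; omega
      have hrel2 := hrel1
      simp only [pvStepA, eq_false hcnd, hg1, show ('L' : Char) ≠ 'R' from by decide, show ('X' : Char) ≠ '_' from by decide, if_true, if_false]
      simp only [pvInv]
      rw [show (if br + 1 > brx then br + 1 else brx) = brx from by split_ifs <;> omega]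
      refine ⟨hrel2, by omega, by omega, by omega, by omega, by omega, by trivial, ?_, by decide, by decide⟩
      have hrd := pvRel_read hrel2 (r := br + 1) (c := bc) (by omega) (by omega) (by omega) (by omega)
      rw [show (br - brm + 1 : Int) = br + 1 - brm from by omega]
      exact hrd
  -- white cell, d = 0 ('U'): turn to 1, move R
  · have hB : pvStepB ⟨bb, br, bc, 0, brm, brx, bcm, bcx⟩ =
        ⟨PySem.Set.add bb (br, bc), br, bc + 1, 1, brm, brx, bcm, if bc + 1 > bcx then bc + 1 else bcx⟩ := by
      simp [pvStepB, hm,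
        show PySem.List.pyGetD [((-1 : Int), (0 : Int)), (0, 1), (1, 0), (0, -1)] 1 (0, 0)
          = (0, 1) from by decide]
      repeat' apply And.intro
      all_goals omega
    rw [hB, if_neg hm, show PySem.List.pyGetD ['U', 'R', 'D', 'L'] (0 : Int) 'U' = 'U' from by decide]
    have hrel1 : pvRel (pvWriteCellA ar (br - brm) (bc - bcm) 'X') (PySem.Set.add bb (br, bc)) brm brx bcm bcx :=
      pvRel_write hrel hr1 hr2 hc1 hc2 (Or.inl rfl) (fun q => pvMem_add_ite bb (br, bc) q)
    have hd1 := hrel1.2.2.2.2.1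
    have hlh := pvRel_lenH hrel1
    have hlw := pvRel_lenW hrel1
    have hbr : pvBlankRowA (pvWriteCellA ar (br - brm) (bc - bcm) 'X') = List.replicate (bcx - bcm + 1).toNat '_' :=
      pvBlankRowA_eq hd1 (by omega)
    generalize hg1 : pvWriteCellA ar (br - brm) (bc - bcm) 'X' = R1 at hrel1 hd1 hlh hlw hbr ⊢
    by_cases hx : bc = bcx
    · have hcnd : (bc - bcm = PySem.List.len (PySem.List.pyGetD R1 0 []) - 1) := by
        rw [hlw]; omega
      have hrel2 := pvRel_growR hrel1
      simp only [pvStepA, eq_true hcnd, hg1, show ('U' : Char) ≠ 'R' from by decide, show ('U' : Char) ≠ 'L' from by decide, if_true, if_false]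
      simp only [pvInv]
      rw [show (if bc + 1 > bcx then bc + 1 else bcx) = bcx + 1 from by split_ifs <;> omega]
      refine ⟨hrel2, by omega, by omega, by omega, by omega, by trivial, by omega, ?_, by decide, by decide⟩
      have hrd := pvRel_read hrel2 (r := br) (c := bc + 1) (by omega) (by omega) (by omega) (by omega)
      rw [show (bc - bcm + 1 : Int) = bc + 1 - bcm from by omega]
      exact hrd
    · have hcnd : ¬ (bc - bcm = PySem.List.len (PySem.List.pyGetD R1 0 []) - 1) := by
        rw [hlw]; omega
      have hrel2 := hrel1
      simp only [pvStepA, eq_false hcnd, hg1, show ('U' : Char) ≠ 'R' from by decide, show ('U' : Char) ≠ 'L' from by decide, if_true, if_false]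
      simp only [pvInv]
      rw [show (if bc + 1 > bcx then bc + 1 else bcx) = bcx from by split_ifs <;> omega]
      refine ⟨hrel2, by omega, by omega, by omega, by omega, by trivial, by omega, ?_, by decide, by decide⟩
      have hrd := pvRel_read hrel2 (r := br) (c := bc + 1) (by omega) (by omega) (by omega) (by omega)
      rw [show (bc - bcm + 1 : Int) = bc + 1 - bcm from by omega]
      exact hrd
  -- white cell, d = 1 ('R'): turn to 2, move D
  · have hB : pvStepB ⟨bb, br, bc, 1, brm, brx, bcm, bcx⟩ =
        ⟨PySem.Set.add bb (br, bc), br + 1, bc, 2, brm, if br + 1 > brx then br + 1 else brx, bcm, bcx⟩ := by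
      simp [pvStepB, hm,
        show PySem.List.pyGetD [((-1 : Int), (0 : Int)), (0, 1), (1, 0), (0, -1)] 2 (0, 0)
          = (1, 0) from by decide]
      repeat' apply And.intro
      all_goals omega
    rw [hB, if_neg hm, show PySem.List.pyGetD ['U', 'R', 'D', 'L'] (1 : Int) 'U' = 'R' from by decide]
    have hrel1 : pvRel (pvWriteCellA ar (br - brm) (bc - bcm) 'X') (PySem.Set.add bb (br, bc)) brm brx bcm bcx :=
      pvRel_write hrel hr1 hr2 hc1 hc2 (Or.inl rfl) (fun q => pvMem_add_ite bb (br, bc) q)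
    have hd1 := hrel1.2.2.2.2.1
    have hlh := pvRel_lenH hrel1
    have hlw := pvRel_lenW hrel1
    have hbr : pvBlankRowA (pvWriteCellA ar (br - brm) (bc - bcm) 'X') = List.replicate (bcx - bcm + 1).toNat '_' :=
      pvBlankRowA_eq hd1 (by omega)
    generalize hg1 : pvWriteCellA ar (br - brm) (bc - bcm) 'X' = R1 at hrel1 hd1 hlh hlw hbr ⊢
    by_cases hx : br = brx
    · have hcnd : (br - brm = PySem.List.len R1 - 1) := by
        rw [hlh]; omega
      have hrel2 := pvRel_growD hrel1
      simp only [pvStepA, eq_true hcnd, hg1, hbr, PySem.List.insert_zero, if_true]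
      simp only [pvInv]
      rw [show (if br + 1 > brx then br + 1 else brx) = brx + 1 from by split_ifs <;> omega]
      refine ⟨hrel2, by omega, by omega, by omega, by omega, by omega, by trivial, ?_, by decide, by decide⟩
      have hrd := pvRel_read hrel2 (r := br + 1) (c := bc) (by omega) (by omega) (by omega) (by omega)
      rw [show (br - brm + 1 : Int) = br + 1 - brm from by omega]
      exact hrd
    · have hcnd : ¬ (br - brm = PySem.List.len R1 - 1) := by
        rw [hlh]; omega
      have hrel2 := hrel1
      simp only [pvStepA, eq_false hcnd, hg1, if_true, if_false]
      simp only [pvInv]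
      rw [show (if br + 1 > brx then br + 1 else brx) = brx from by split_ifs <;> omega]
      refine ⟨hrel2, by omega, by omega, by omega, by omega, by omega, by trivial, ?_, by decide, by decide⟩
      have hrd := pvRel_read hrel2 (r := br + 1) (c := bc) (by omega) (by omega) (by omega) (by omega)
      rw [show (br - brm + 1 : Int) = br + 1 - brm from by omega]
      exact hrd
  -- white cell, d = 2 ('D'): turn to 3, move L
  · have hB : pvStepB ⟨bb, br, bc, 2, brm, brx, bcm, bcx⟩ =
        ⟨PySem.Set.add bb (br, bc), br, bc - 1, 3, brm, brx, if bc - 1 < bcm then bc - 1 else bcm, bcx⟩ := by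
      simp [pvStepB, hm,
        show PySem.List.pyGetD [((-1 : Int), (0 : Int)), (0, 1), (1, 0), (0, -1)] 3 (0, 0)
          = (0, -1) from by decide]
      repeat' apply And.intro
      all_goals (try split_ifs) <;> omega
    rw [hB, if_neg hm, show PySem.List.pyGetD ['U', 'R', 'D', 'L'] (2 : Int) 'U' = 'D' from by decide]
    have hrel1 : pvRel (pvWriteCellA ar (br - brm) (bc - bcm) 'X') (PySem.Set.add bb (br, bc)) brm brx bcm bcx :=
      pvRel_write hrel hr1 hr2 hc1 hc2 (Or.inl rfl) (fun q => pvMem_add_ite bb (br, bc) q)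
    have hd1 := hrel1.2.2.2.2.1
    have hlh := pvRel_lenH hrel1
    have hlw := pvRel_lenW hrel1
    have hbr : pvBlankRowA (pvWriteCellA ar (br - brm) (bc - bcm) 'X') = List.replicate (bcx - bcm + 1).toNat '_' :=
      pvBlankRowA_eq hd1 (by omega)
    generalize hg1 : pvWriteCellA ar (br - brm) (bc - bcm) 'X' = R1 at hrel1 hd1 hlh hlw hbr ⊢
    by_cases hx : bc = bcm
    · have hcnd : (bc - bcm = 0) := by
        omega
      have hrel2 := pvRel_growL hrel1
      simp only [pvStepA, eq_true hcnd, hg1, show ('D' : Char) ≠ 'R' from by decide, show ('D' : Char) ≠ 'L' from by decide, show ('D' : Char) ≠ 'U' from by decide, if_true, if_false]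
      simp only [pvInv]
      rw [show (if bc - 1 < bcm then bc - 1 else bcm) = bcm - 1 from by split_ifs <;> omega]
      refine ⟨hrel2, by omega, by omega, by omega, by omega, by trivial, by omega, ?_, by decide, by decide⟩
      have hrd := pvRel_read hrel2 (r := br) (c := bc - 1) (by omega) (by omega) (by omega) (by omega)
      rw [show (bc - bcm + 1 - 1 : Int) = bc - 1 - (bcm - 1) from by omega]
      exact hrd
    · have hcnd : ¬ (bc - bcm = 0) := by
        omega
      have hrel2 := hrel1
      simp only [pvStepA, eq_false hcnd, hg1, show ('D' : Char) ≠ 'R' from by decide, show ('D' : Char) ≠ 'L' from by decide, show ('D' : Char) ≠ 'U' from by decide, if_true, if_false]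
      simp only [pvInv]
      rw [show (if bc - 1 < bcm then bc - 1 else bcm) = bcm from by split_ifs <;> omega]
      refine ⟨hrel2, by omega, by omega, by omega, by omega, by trivial, by omega, ?_, by decide, by decide⟩
      have hrd := pvRel_read hrel2 (r := br) (c := bc - 1) (by omega) (by omega) (by omega) (by omega)
      rw [show (bc - bcm - 1 : Int) = bc - 1 - bcm from by omega]
      exact hrd
  -- white cell, d = 3 ('L'): turn to 0, move U
  · have hB : pvStepB ⟨bb, br, bc, 3, brm, brx, bcm, bcx⟩ =
        ⟨PySem.Set.add bb (br, bc), br - 1, bc, 0, if br - 1 < brm then br - 1 else brm, brx, bcm, bcx⟩ := by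
      simp [pvStepB, hm,
        show PySem.List.pyGetD [((-1 : Int), (0 : Int)), (0, 1), (1, 0), (0, -1)] 0 (0, 0)
          = (-1, 0) from by decide]
      repeat' apply And.intro
      all_goals (try split_ifs) <;> omega
    rw [hB, if_neg hm, show PySem.List.pyGetD ['U', 'R', 'D', 'L'] (3 : Int) 'U' = 'L' from by decide]
    have hrel1 : pvRel (pvWriteCellA ar (br - brm) (bc - bcm) 'X') (PySem.Set.add bb (br, bc)) brm brx bcm bcx :=
      pvRel_write hrel hr1 hr2 hc1 hc2 (Or.inl rfl) (fun q => pvMem_add_ite bb (br, bc) q)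
    have hd1 := hrel1.2.2.2.2.1
    have hlh := pvRel_lenH hrel1
    have hlw := pvRel_lenW hrel1
    have hbr : pvBlankRowA (pvWriteCellA ar (br - brm) (bc - bcm) 'X') = List.replicate (bcx - bcm + 1).toNat '_' :=
      pvBlankRowA_eq hd1 (by omega)
    generalize hg1 : pvWriteCellA ar (br - brm) (bc - bcm) 'X' = R1 at hrel1 hd1 hlh hlw hbr ⊢
    by_cases hx : br = brm
    · have hcnd : (br - brm = 0) := by
        omega
      have hrel2 := pvRel_growU hrel1
      simp only [pvStepA, eq_true hcnd, hg1, show ('L' : Char) ≠ 'R' from by decide, hbr, PySem.List.insert_zero, if_true, if_false]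
      simp only [pvInv]
      rw [show (if br - 1 < brm then br - 1 else brm) = brm - 1 from by split_ifs <;> omega]
      refine ⟨hrel2, by omega, by omega, by omega, by omega, by omega, by trivial, ?_, by decide, by decide⟩
      have hrd := pvRel_read hrel2 (r := br - 1) (c := bc) (by omega) (by omega) (by omega) (by omega)
      rw [show (br - brm + 1 - 1 : Int) = br - 1 - (brm - 1) from by omega]
      exact hrd
    · have hcnd : ¬ (br - brm = 0) := by
        omega
      have hrel2 := hrel1
      simp only [pvStepA, eq_false hcnd, hg1, show ('L' : Char) ≠ 'R' from by decide, if_true, if_false]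
      simp only [pvInv]
      rw [show (if br - 1 < brm then br - 1 else brm) = brm from by split_ifs <;> omega]
      refine ⟨hrel2, by omega, by omega, by omega, by omega, by omega, by trivial, ?_, by decide, by decide⟩
      have hrd := pvRel_read hrel2 (r := br - 1) (c := bc) (by omega) (by omega) (by omega) (by omega)
      rw [show (br - brm - 1 : Int) = br - 1 - brm from by omega]
      exact hrd

theorem pvLoop_inv (n : Nat) : ∀ (K : Int), K.toNat = n → ∀ a b, pvInv a b →
    pvInv (pvLoopA K a) (pvLoopB K b) := by
  induction n with
  | zero =>
    intro K hn a b h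
    rw [pvLoopA.eq_def, pvLoopB.eq_def, if_neg (by omega), if_neg (by omega)]
    exact h
  | succ n ih =>
    intro K hn a b h
    rw [pvLoopA.eq_def, pvLoopB.eq_def, if_pos (by omega), if_pos (by omega)]
    exact ih (K - 1) (by omega) _ _ (pvStep_inv h)

theorem pvInv_init : pvInv ⟨'_', [['_']], 'R', 0, 0⟩ ⟨PySem.Set.empty, 0, 0, 1, 0, 0, 0, 0⟩ := by
  simp only [pvInv]
  refine ⟨⟨by omega, by omega, by omega, by omega, ⟨rfl, ?_⟩, ?_, ?_⟩,
    by omega, by omega, by omega, by omega, by omega, by omega, ?_, by decide, by decide⟩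
  · intro r hr
    simp at hr
    subst hr
    rfl
  · intro i j hi hj
    have : i = 0 := by omega
    subst this
    have : j = 0 := by omega
    subst this
    simp [pvCell, PySem.Set.empty]
  · intro p hp
    simp [PySem.Set.empty] at hp
  · simp [PySem.Set.empty]

theorem pvCell_eq_getElem {g : List (List Char)} {i j : Nat} (hi : i < g.length)
    (hj : j < g[i].length) : pvCell g i j = g[i][j] := by
  unfold pvCell
  rw [show g.getD i [] = g[i] from by
        rw [List.getD_eq_getElem?_getD, List.getElem?_eq_getElem hi]; rfl,
      List.getD_eq_getElem?_getD, List.getElem?_eq_getElem hj]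
  rfl

theorem pvGrid_ext {g1 g2 : List (List Char)} {hh ww : Nat}
    (hd1 : pvDims g1 hh ww) (hd2 : pvDims g2 hh ww)
    (h : ∀ i j, i < hh → j < ww → pvCell g1 i j = pvCell g2 i j) : g1 = g2 := by
  apply List.ext_getElem (by rw [hd1.1, hd2.1])
  intro i h1 h2
  have hr1 : g1[i].length = ww := hd1.2 _ (List.getElem_mem _)
  have hr2 : g2[i].length = ww := hd2.2 _ (List.getElem_mem _)
  apply List.ext_getElem (by rw [hr1, hr2])
  intro j hj1 hj2
  rw [← pvCell_eq_getElem h1 hj1, ← pvCell_eq_getElem h2 hj2]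
  have e1 := hd1.1
  exact h i j (by omega) (by omega)

theorem pvPaintFold (rmin rmax cmin cmax : Int) (l : List (Int × Int)) :
    ∀ g : List (List Char),
    pvDims g (rmax - rmin + 1).toNat (cmax - cmin + 1).toNat →
    (∀ p ∈ l, rmin ≤ p.1 ∧ p.1 ≤ rmax ∧ cmin ≤ p.2 ∧ p.2 ≤ cmax) →
    pvDims (l.foldl (fun g p => pvPaintB g (p.1 - rmin) (p.2 - cmin) 'X') g)
      (rmax - rmin + 1).toNat (cmax - cmin + 1).toNat ∧
    (∀ i j : Nat, i < (rmax - rmin + 1).toNat → j < (cmax - cmin + 1).toNat →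
      pvCell (l.foldl (fun g p => pvPaintB g (p.1 - rmin) (p.2 - cmin) 'X') g) i j =
        if ((rmin + i : Int), (cmin + j : Int)) ∈ l then 'X' else pvCell g i j) := by
  induction l with
  | nil => intro g hd _; exact ⟨hd, fun i j hi hj => by simp⟩
  | cons p l ih =>
    intro g hd hb
    have hp := hb p (by simp)
    have hpe : pvPaintB g (p.1 - rmin) (p.2 - cmin) 'X' =
        g.set (p.1 - rmin).toNat ((g.getD (p.1 - rmin).toNat []).set (p.2 - cmin).toNat 'X') :=
      pvPaintB_eq hd 'X' (by omega) (by omega) (by omega) (by omega)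
    have hrow : (g.getD (p.1 - rmin).toNat []).length = (cmax - cmin + 1).toNat :=
      pvDims_rowlen hd (by omega)
    have hd' : pvDims (pvPaintB g (p.1 - rmin) (p.2 - cmin) 'X')
        (rmax - rmin + 1).toNat (cmax - cmin + 1).toNat := by
      rw [hpe]; exact pvDims_set hd (by rw [List.length_set, hrow])
    obtain ⟨ihd, ihc⟩ := ih _ hd' (fun q hq => hb q (List.mem_cons_of_mem _ hq))
    refine ⟨by simpa using ihd, ?_⟩
    intro i j hi hj
    rw [List.foldl_cons, ihc i j hi hj]
    by_cases hmem : ((rmin + i : Int), (cmin + j : Int)) ∈ l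
    · simp [hmem]
    · rw [if_neg hmem, hpe, pvCell_set (by have := hd.1; omega) (by rw [hrow]; omega) i j]
      by_cases hq : ((rmin + i : Int), (cmin + j : Int)) = p
      · have h1 : i = (p.1 - rmin).toNat := by
          have := congrArg Prod.fst hq; simp at this; omega
        have h2 : j = (p.2 - cmin).toNat := by
          have := congrArg Prod.snd hq; simp at this; omega
        rw [if_pos ⟨h1, h2⟩, if_pos (by simp [hq])]
      · have hne : ¬ (i = (p.1 - rmin).toNat ∧ j = (p.2 - cmin).toNat) := by
          intro ⟨h1, h2⟩
          exact hq (by subst h1; subst h2; rw [Prod.ext_iff]; constructor <;> simp <;> omega)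
        rw [if_neg hne, if_neg (by simp [hq, hmem])]

theorem pvRender0 (rmin rmax cmin cmax : Int) (h1 : rmin ≤ rmax) (h2 : cmin ≤ cmax) :
    pvDims ((PySem.List.pyRange 0 (rmax - rmin + 1) 1).map
        (fun _ => List.replicate (cmax - cmin + 1).toNat '_'))
      (rmax - rmin + 1).toNat (cmax - cmin + 1).toNat ∧
    ∀ i j : Nat, i < (rmax - rmin + 1).toNat → j < (cmax - cmin + 1).toNat →
      pvCell ((PySem.List.pyRange 0 (rmax - rmin + 1) 1).map
        (fun _ => List.replicate (cmax - cmin + 1).toNat '_')) i j = '_' := by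
  constructor
  · refine ⟨by simp [PySem.List.length_pyRange_one], fun r hr => ?_⟩
    obtain ⟨x, hx, rfl⟩ := List.mem_map.1 hr
    simp
  · intro i j hi hj
    have hrow0 : ((PySem.List.pyRange 0 (rmax - rmin + 1) 1).map
          (fun _ => List.replicate (cmax - cmin + 1).toNat '_')).getD i [] =
          List.replicate (cmax - cmin + 1).toNat '_' := by
      rw [List.getD_eq_getElem?_getD, List.getElem?_map,
          List.getElem?_eq_getElem (by simp [PySem.List.length_pyRange_one]; omega)]
      rfl
    unfold pvCell
    rw [hrow0, List.getD_replicate _ (by omega)]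

-- ===== VERDICT (by name: the statement is the Claim_ definition above) =====
theorem printKMoves_spec : Claim_equal_printKMoves := by
  unfold Claim_equal_printKMoves
  intro K _
  unfold Spec_printKMoves
  simp only [printKMoves, printKMoves_alt]
  have h := pvLoop_inv K.toNat K rfl _ _ pvInv_init
  generalize hA : pvLoopA K ⟨'_', [['_']], 'R', 0, 0⟩ = sa at h ⊢
  generalize hB : pvLoopB K ⟨PySem.Set.empty, 0, 0, 1, 0, 0, 0, 0⟩ = sb at h ⊢
  obtain ⟨sac, sar, sad, sai, saj⟩ := sa
  obtain ⟨bb, br, bc, bd, brm, brx, bcm, bcx⟩ := sb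
  obtain ⟨hrel, hr1, hr2, hc1, hc2, hi, hj, hcol, hd, hd4⟩ := h
  simp only at hrel hr1 hr2 hc1 hc2 hi hj hcol hd hd4 ⊢
  subst hi hj hcol hd
  congr 1
  have hdims := hrel.2.2.2.2.1
  have hcells := hrel.2.2.2.2.2.1
  have hbb := hrel.2.2.2.2.2.2
  have hb1 := hrel.1
  have hb2 := hrel.2.1
  have hb3 := hrel.2.2.1
  have hb4 := hrel.2.2.2.1
  have hH : ((brx - brm + 1).toNat : Int) = brx - brm + 1 := by omega
  have hW : ((bcx - bcm + 1).toNat : Int) = bcx - bcm + 1 := by omega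
  -- A final grid in set form
  rw [pvWriteCellA_eq hdims _ (by omega) (by omega) (by omega) (by omega)]
  have hrowA : (sar.getD (br - brm).toNat []).length = (bcx - bcm + 1).toNat :=
    pvDims_rowlen hdims (by omega)
  have hdA : pvDims (sar.set (br - brm).toNat
      ((sar.getD (br - brm).toNat []).set (bc - bcm).toNat
        (PySem.List.pyGetD ['U', 'R', 'D', 'L'] bd 'U')))
      (brx - brm + 1).toNat (bcx - bcm + 1).toNat :=
    pvDims_set hdims (by rw [List.length_set, hrowA])
  -- B final grid in set form
  obtain ⟨hd0, hc0⟩ := pvRender0 brm brx bcm bcx (by omega) (by omega)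
  obtain ⟨hdF, hcF⟩ := pvPaintFold brm brx bcm bcx bb _ hd0 hbb
  set F := List.foldl (fun (g : List (List Char)) (p : Int × Int) =>
      pvPaintB g (p.1 - brm) (p.2 - bcm) 'X')
    ((PySem.List.pyRange 0 (brx - brm + 1) 1).map
      (fun _ => List.replicate (bcx - bcm + 1).toNat '_')) bb with hF
  rw [pvPaintB_eq hdF _ (by omega) (by omega) (by omega) (by omega)]
  have hrowB := pvDims_rowlen hdF (show (br - brm).toNat < (brx - brm + 1).toNat by omega)
  have hdB := pvDims_set hdF (i := (br - brm).toNat) (row := (F.getD (br - brm).toNat []).set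
      (bc - bcm).toNat (PySem.List.pyGetD ['U', 'R', 'D', 'L'] bd 'U'))
    (by rw [List.length_set, hrowB])
  apply pvGrid_ext hdA hdB
  intro i j hi hj
  rw [pvCell_set (by have := hdims.1; omega) (by rw [hrowA]; omega) i j,
      pvCell_set (by have := hdF.1; omega) (by rw [hrowB]; omega) i j]
  by_cases hpos : i = (br - brm).toNat ∧ j = (bc - bcm).toNat
  · rw [if_pos hpos, if_pos hpos]
  · rw [if_neg hpos, if_neg hpos, hcells i j hi hj, hcF i j hi hj, hc0 i j hi hj]
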